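-- pv_equiv track=rewrite | github.com/cct15/2020_capstone | color_calibration/color_calibration.py | FindColorPatch
-- ===== SOURCE A (Python) =====
-- def FindColorPatch(rgb,thre=6):
--     row, col = len(rgb), len(rgb[0])
--     binary = [[0] * col for i in range(row)]
--     for i in range(row-1):
--         for j in range(col-1):
--             if sum(rgb[i][j]) < 740 and sum(rgb[i][j]) >120:
--                 if abs(sum(rgb[i][j]) - sum(rgb[i][j+1])) < thre and abs(sum(rgb[i][j]) - sum(rgb[i+1][j])) < thre:
--                       binary[i][j] = 1
--     cells = []
--     def dfs(x,y,binary,path):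
--         dirs = [[-1, 0], [0, 1], [0, -1], [1, 0]]
--         path.append([x,y])
--         binary[x][y] = 0
--         for dir in dirs:
--             x_, y_ = x + dir[0], y + dir[1]
--             if x_ >= 0 and x_ < row and y_ >= 0 and y_ < col:
--                 if binary[x_][y_] == 1:
--                     dfs(x_,y_,binary,path)
--     binary_cp = binary.copy()
--     for i in range(row):
--         for j in range(col):
--             if binary[i][j] == 1:
--                 path = []
--                 dfs(i,j,binary_cp,path)
--                 cells.append(path)
--     count = 0
--     new_binary = [[0] * col for i in range(row)]
--     for item in cells:
--         if len(item)>1500: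
--             for sub in item:
--                 new_binary[sub[0]][sub[1]] = 1
--             count+=1
--     #plt.imshow(new_binary)
--     return new_binary,count,cells
-- ===== SOURCE B (Python) =====
-- def FindColorPatch(rgb, thre=6):
--     row, col = len(rgb), len(rgb[0])
--     binary = [[0] * col for _ in range(row)]
--     for i in range(row - 1):
--         for j in range(col - 1):
--             s = sum(rgb[i][j])
--             if 120 < s < 740:
--                 if abs(s - sum(rgb[i][j + 1])) < thre and abs(s - sum(rgb[i + 1][j])) < thre:
--                     binary[i][j] = 1
--     cells = []
--     for i in range(row):
--         for j in range(col):
--             if binary[i][j] == 1: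
--                 path = []
--                 stack = [(i, j)]
--                 while stack:
--                     x, y = stack.pop()
--                     if binary[x][y] != 1:
--                         continue
--                     path.append([x, y])
--                     binary[x][y] = 0
--                     for dx, dy in ((1, 0), (0, -1), (0, 1), (-1, 0)):
--                         x_, y_ = x + dx, y + dy
--                         if 0 <= x_ < row and 0 <= y_ < col:
--                             stack.append((x_, y_))
--                 cells.append(path)
--     count = 0
--     new_binary = [[0] * col for _ in range(row)]
--     for item in cells:
--         if len(item) > 1500:
--             for sub in item:
--                 new_binary[sub[0]][sub[1]] = 1
--             count += 1
--     return new_binary, count, cells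
-- ===== Notes on version B (the rewrite author's own statement) =====
-- stated objective: alternative
-- what changed: A's recursive dfs over the binary grid is replaced by an explicit-stack flood fill (pop a cell, skip if already cleared, else record/clear it and push its in-range neighbors in reverse dirs order), which reproduces the recursive preorder without recursion; the threshold and size-filter passes are unchanged.
import Mathlib
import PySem

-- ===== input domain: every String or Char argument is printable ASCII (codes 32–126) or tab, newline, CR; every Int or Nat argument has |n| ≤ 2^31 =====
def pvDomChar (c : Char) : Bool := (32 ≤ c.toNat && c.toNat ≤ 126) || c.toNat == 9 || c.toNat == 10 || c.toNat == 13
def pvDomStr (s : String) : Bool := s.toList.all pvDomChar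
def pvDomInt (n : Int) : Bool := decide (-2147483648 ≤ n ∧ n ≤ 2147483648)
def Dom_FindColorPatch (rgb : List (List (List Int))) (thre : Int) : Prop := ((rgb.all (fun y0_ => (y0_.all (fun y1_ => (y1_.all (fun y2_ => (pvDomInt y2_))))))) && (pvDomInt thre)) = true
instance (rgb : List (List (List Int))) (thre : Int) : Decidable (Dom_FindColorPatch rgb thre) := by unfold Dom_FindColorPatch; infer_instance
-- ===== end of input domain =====

-- B replaces A's recursive dfs by an explicit-stack flood fill (pop-time visited check,
-- neighbors pushed in reverse dirs order) producing the same preorder; the threshold and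
-- size-filter passes are unchanged.  Objective: alternative (same complexity).

-- ===== shared helpers (these passes are literally identical in A's and B's Python) =====
def pvCell (g : List (List Int)) (i j : Nat) : Int := (g.getD i []).getD j 0
def pvSet2 (g : List (List Int)) (i j : Nat) (v : Int) : List (List Int) :=
  g.set i ((g.getD i []).set j v)
-- number of 1-cells of the grid (A's port uses it as sufficient recursion fuel,
-- B's port as its termination measure)
def pvOnes (g : List (List Int)) : Nat := (g.map (fun r => r.count 1)).sum
-- first pass building `binary` (identical source code in A and B)
def pvThresh (rgb : List (List (List Int))) (thre : Int) (row col : Nat) : List (List Int) :=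
  (List.range (row - 1)).foldl (fun b i =>
    (List.range (col - 1)).foldl (fun b j =>
      let s := ((rgb.getD i []).getD j []).sum
      if s < 740 ∧ s > 120 then
        if |s - ((rgb.getD i []).getD (j+1) []).sum| < thre ∧
           |s - ((rgb.getD (i+1) []).getD j []).sum| < thre then
          pvSet2 b i j 1
        else b
      else b) b)
    (List.replicate row (List.replicate col 0))
-- final pass building `new_binary`/`count` (identical source code in A and B)
def pvFilter (cells : List (List (List Int))) (row col : Nat) : List (List Int) × Int :=
  cells.foldl (fun st item =>
    if 1500 < item.length then
      (item.foldl (fun nb sub => pvSet2 nb (sub.getD 0 0).toNat (sub.getD 1 0).toNat 1) st.1,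
       st.2 + 1)
    else st)
    (List.replicate row (List.replicate col 0), 0)

-- termination lemmas cited by name in pvFlood's decreasing_by (so they precede the ports)
theorem pvCount_set_zero_lt (l : List Int) (y : Nat) (h : l.getD y 0 = 1) :
    (l.set y 0).count 1 < l.count 1 := by
  induction l generalizing y with
  | nil => simp [List.getD] at h
  | cons a t ih =>
    cases y with
    | zero =>
      simp [List.getD] at h
      simp [List.set, h]
    | succ y =>
      simp only [List.set, List.count_cons]
      have := ih y (by simpa [List.getD] using h)
      omega

theorem pvOnes_set_zero_lt (g : List (List Int)) (x y : Nat) (h : pvCell g x y = 1) :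
    pvOnes (pvSet2 g x y 0) < pvOnes g := by
  induction g generalizing x with
  | nil => simp [pvCell, List.getD] at h
  | cons r t ih =>
    cases x with
    | zero =>
      have h' : r.getD y 0 = 1 := by simpa [pvCell, List.getD_cons_zero] using h
      have hc := pvCount_set_zero_lt r y h'
      simp only [pvSet2, List.getD_cons_zero, List.set_cons_zero, pvOnes, List.map_cons,
        List.sum_cons]
      omega
    | succ x =>
      have h' : pvCell t x y = 1 := by simpa [pvCell, List.getD_cons_succ] using h
      have hc := ih x h'
      simp only [pvSet2, List.getD_cons_succ, List.set_cons_succ, pvOnes, List.map_cons,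
        List.sum_cons] at hc ⊢
      omega

-- ===== PORT A =====
def pvDirs : List (Int × Int) := [(-1, 0), (0, 1), (0, -1), (1, 0)]

-- A's recursive dfs; the fuel argument only bounds the recursion depth, and the call
-- sites pass pvOnes of the current grid, which is proved sufficient (pvFlood_eq_dfs
-- below never reaches fuel 0), so this is exact for A's unbounded recursion.
def pvDfsA (row col : Nat) : Nat → Nat → Nat → List (List Int) → List (List Int) →
    List (List Int) × List (List Int)
  | 0, _, _, g, path => (g, path)
  | f + 1, x, y, g, path =>
    pvDirs.foldl (fun st d =>
        let x_ : Int := (x : Int) + d.1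
        let y_ : Int := (y : Int) + d.2
        if 0 ≤ x_ ∧ x_ < (row : Int) ∧ 0 ≤ y_ ∧ y_ < (col : Int) ∧
            pvCell st.1 x_.toNat y_.toNat = 1 then
          pvDfsA row col f x_.toNat y_.toNat st.1 st.2
        else st)
      (pvSet2 g x y 0, path ++ [[(x : Int), (y : Int)]])

def FindColorPatch (rgb : List (List (List Int))) (thre : Int) :
    List (List Int) × Int × List (List (List Int)) :=
  let row := rgb.length
  let col := (rgb.getD 0 []).length
  let binary := pvThresh rgb thre row col
  let st := (List.range row).foldl (fun st i =>
      (List.range col).foldl (fun st j =>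
        if pvCell st.1 i j = 1 then
          ((pvDfsA row col (pvOnes st.1) i j st.1 []).1,
           st.2 ++ [(pvDfsA row col (pvOnes st.1) i j st.1 []).2])
        else st) st)
    ((binary, []) : List (List Int) × List (List (List Int)))
  let nb := pvFilter st.2 row col
  (nb.1, nb.2, st.2)

-- ===== PORT B =====
def pvRevDirs : List (Int × Int) := [(1, 0), (0, -1), (0, 1), (-1, 0)]

-- push the in-range neighbors in reverse dirs order (top of stack = head of the list)
def pvPush (row col x y : Nat) (rest : List (Nat × Nat)) : List (Nat × Nat) :=
  pvRevDirs.foldl (fun st d =>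
    let x_ : Int := (x : Int) + d.1
    let y_ : Int := (y : Int) + d.2
    if 0 ≤ x_ ∧ x_ < (row : Int) ∧ 0 ≤ y_ ∧ y_ < (col : Int) then
      (x_.toNat, y_.toNat) :: st
    else st) rest

-- the explicit-stack flood fill: pop a cell, skip it if it is no longer 1, otherwise
-- record it, clear it, and push its in-range neighbors
def pvFlood (row col : Nat) (g : List (List Int)) (stack : List (Nat × Nat))
    (path : List (List Int)) : List (List Int) × List (List Int) :=
  match stack with
  | [] => (g, path)
  | (x, y) :: rest =>
    if h : pvCell g x y = 1 then
      pvFlood row col (pvSet2 g x y 0) (pvPush row col x y rest)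
        (path ++ [[(x : Int), (y : Int)]])
    else
      pvFlood row col g rest path
termination_by (pvOnes g, stack.length)
decreasing_by
  · exact Prod.Lex.left _ _ (pvOnes_set_zero_lt g x y h)
  · exact Prod.Lex.right _ (Nat.lt_succ_self _)

def FindColorPatch_alt (rgb : List (List (List Int))) (thre : Int) :
    List (List Int) × Int × List (List (List Int)) :=
  let row := rgb.length
  let col := (rgb.getD 0 []).length
  let binary := pvThresh rgb thre row col
  let st := (List.range row).foldl (fun st i =>
      (List.range col).foldl (fun st j =>
        if pvCell st.1 i j = 1 then
          ((pvFlood row col st.1 [(i, j)] []).1,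
           st.2 ++ [(pvFlood row col st.1 [(i, j)] []).2])
        else st) st)
    ((binary, []) : List (List Int) × List (List (List Int)))
  let nb := pvFilter st.2 row col
  (nb.1, nb.2, st.2)

-- ===== PRECONDITION & SPEC =====
-- Pre_ excludes exactly the inputs on which A raises IndexError: the empty grid
-- (rgb[0] raises) and grids where an access of the threshold pass -- rgb[i][j] always,
-- rgb[i][j+1] when the sum guard holds, rgb[i+1][j] when the first abs guard also
-- holds -- falls off the end of a short row.
def Pre_FindColorPatch (rgb : List (List (List Int))) (thre : Int) : Prop :=
  rgb ≠ [] ∧ ∀ i < rgb.length - 1, ∀ j < (rgb.getD 0 []).length - 1,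
    j < (rgb.getD i []).length ∧
    (120 < ((rgb.getD i []).getD j []).sum ∧ ((rgb.getD i []).getD j []).sum < 740 →
      j + 1 < (rgb.getD i []).length ∧
      (|((rgb.getD i []).getD j []).sum - ((rgb.getD i []).getD (j+1) []).sum| < thre →
        j < (rgb.getD (i+1) []).length))
instance (rgb : List (List (List Int))) (thre : Int) : Decidable (Pre_FindColorPatch rgb thre) := by
  unfold Pre_FindColorPatch; infer_instance

def pvWitness_FindColorPatch : List (List (List Int)) × Int :=
  ([[[200], [200]], [[200], [200]]], 6)

def Spec_FindColorPatch (rgb : List (List (List Int))) (thre : Int)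
    (out : List (List Int) × Int × List (List (List Int))) : Prop :=
  out = FindColorPatch_alt rgb thre
instance (rgb : List (List (List Int))) (thre : Int)
    (out : List (List Int) × Int × List (List (List Int))) :
    Decidable (Spec_FindColorPatch rgb thre out) := by
  unfold Spec_FindColorPatch; infer_instance

-- ===== CLAIM (what is proved, stated in full; the proofs are below) =====
def Claim_equal_FindColorPatch : Prop :=
  ∀ (rgb : List (List (List Int))) (thre : Int), Dom_FindColorPatch rgb thre →
    Pre_FindColorPatch rgb thre → Spec_FindColorPatch rgb thre (FindColorPatch rgb thre)

-- ===== LEMMAS AND PROOFS =====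

theorem pvCount_set_zero_le (l : List Int) (y : Nat) :
    (l.set y 0).count 1 ≤ l.count 1 := by
  induction l generalizing y with
  | nil => simp
  | cons a t ih =>
    cases y with
    | zero =>
      have h0 : ((a :: t).set 0 0).count 1 = t.count 1 := by simp [List.count_cons]
      rw [h0, List.count_cons]
      split <;> omega
    | succ y =>
      simp only [List.set_cons_succ, List.count_cons]
      have := ih y
      omega

theorem pvOnes_set_zero_le (g : List (List Int)) (x y : Nat) :
    pvOnes (pvSet2 g x y 0) ≤ pvOnes g := by
  induction g generalizing x with
  | nil => simp [pvSet2, pvOnes]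
  | cons r t ih =>
    cases x with
    | zero =>
      have hc := pvCount_set_zero_le r y
      simp only [pvSet2, List.getD_cons_zero, List.set_cons_zero, pvOnes, List.map_cons,
        List.sum_cons]
      omega
    | succ x =>
      have hc := ih x
      simp only [pvSet2, List.getD_cons_succ, List.set_cons_succ, pvOnes, List.map_cons,
        List.sum_cons] at hc ⊢
      omega

theorem pvOnes_pos (g : List (List Int)) (x y : Nat) (h : pvCell g x y = 1) :
    0 < pvOnes g :=
  Nat.lt_of_le_of_lt (Nat.zero_le _) (pvOnes_set_zero_lt g x y h)

-- a compact name for the dirs-fold step inside pvDfsA (definitionally equal to it)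
def pvStepD (row col m x y : Nat) (st : List (List Int) × List (List Int)) (d : Int × Int) :
    List (List Int) × List (List Int) :=
  if 0 ≤ (x : Int) + d.1 ∧ (x : Int) + d.1 < (row : Int) ∧ 0 ≤ (y : Int) + d.2 ∧
      (y : Int) + d.2 < (col : Int) ∧
      pvCell st.1 ((x : Int) + d.1).toNat ((y : Int) + d.2).toNat = 1 then
    pvDfsA row col m ((x : Int) + d.1).toNat ((y : Int) + d.2).toNat st.1 st.2
  else st

theorem pvDfsA_succ (row col m x y : Nat) (g path : List (List Int)) :
    pvDfsA row col (m + 1) x y g path =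
      pvDirs.foldl (pvStepD row col m x y)
        (pvSet2 g x y 0, path ++ [[(x : Int), (y : Int)]]) := rfl

theorem pvFlood_nil (row col : Nat) (g : List (List Int)) (path : List (List Int)) :
    pvFlood row col g [] path = (g, path) := by
  rw [pvFlood]

theorem pvFlood_cons_one (row col : Nat) (g : List (List Int)) (x y : Nat)
    (rest : List (Nat × Nat)) (path : List (List Int)) (h : pvCell g x y = 1) :
    pvFlood row col g ((x, y) :: rest) path =
      pvFlood row col (pvSet2 g x y 0) (pvPush row col x y rest)
        (path ++ [[(x : Int), (y : Int)]]) := by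
  rw [pvFlood]
  simp [h]

theorem pvFlood_cons_skip (row col : Nat) (g : List (List Int)) (x y : Nat)
    (rest : List (Nat × Nat)) (path : List (List Int)) (h : ¬ pvCell g x y = 1) :
    pvFlood row col g ((x, y) :: rest) path = pvFlood row col g rest path := by
  rw [pvFlood]
  simp [h]

theorem pvDfsA_ones_le (row col : Nat) :
    ∀ f x y (g path : List (List Int)), pvOnes (pvDfsA row col f x y g path).1 ≤ pvOnes g := by
  intro f
  induction f with
  | zero => intro x y g path; exact le_rfl
  | succ f ih =>
    intro x y g path
    rw [pvDfsA_succ]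
    have hfold : ∀ (ds : List (Int × Int)) (st : List (List Int) × List (List Int)),
        pvOnes (ds.foldl (pvStepD row col f x y) st).1 ≤ pvOnes st.1 := by
      intro ds
      induction ds with
      | nil => intro st; exact le_rfl
      | cons d ds ihd =>
        intro st
        rw [List.foldl_cons]
        refine le_trans (ihd _) ?_
        by_cases hg : (0 ≤ (x : Int) + d.1 ∧ (x : Int) + d.1 < (row : Int) ∧
            0 ≤ (y : Int) + d.2 ∧ (y : Int) + d.2 < (col : Int) ∧
            pvCell st.1 ((x : Int) + d.1).toNat ((y : Int) + d.2).toNat = 1)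
        · have hs : pvStepD row col f x y st d =
              pvDfsA row col f ((x : Int) + d.1).toNat ((y : Int) + d.2).toNat st.1 st.2 := by
            simp [pvStepD, hg]
          rw [hs]
          exact ih _ _ st.1 st.2
        · have hs : pvStepD row col f x y st d = st := by simp [pvStepD, hg]
          rw [hs]
    exact le_trans (hfold pvDirs _) (pvOnes_set_zero_le g x y)

-- the in-range neighbor list of (x,y) for a list of directions, in dirs order
def pvNbrsL (row col x y : Nat) (ds : List (Int × Int)) : List (Nat × Nat) :=
  ds.filterMap (fun d =>
    if 0 ≤ (x : Int) + d.1 ∧ (x : Int) + d.1 < (row : Int) ∧ 0 ≤ (y : Int) + d.2 ∧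
        (y : Int) + d.2 < (col : Int) then
      some (((x : Int) + d.1).toNat, ((y : Int) + d.2).toNat)
    else none)

-- B's push really is "in-range neighbors in dirs order, on top of the rest"
theorem pvPush_eq (row col x y : Nat) (rest : List (Nat × Nat)) :
    pvPush row col x y rest = pvNbrsL row col x y pvDirs ++ rest := by
  simp only [pvPush, pvRevDirs, pvNbrsL, pvDirs, List.foldl, List.filterMap]
  split_ifs <;> simp_all

-- KEY LEMMA: popping a live cell and flooding equals running A's recursive dfs there
-- (with any fuel ≥ pvOnes g) and continuing with the rest of the stack.
theorem pvFlood_eq_dfs (row col : Nat) :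
    ∀ N g x y (rest : List (Nat × Nat)) path f, pvOnes g ≤ N → pvCell g x y = 1 →
      pvOnes g ≤ f →
      pvFlood row col g ((x, y) :: rest) path =
        pvFlood row col (pvDfsA row col f x y g path).1 rest
          (pvDfsA row col f x y g path).2 := by
  intro N
  induction N using Nat.strong_induction_on with
  | _ N IH =>
    intro g x y rest path f hN hcell hf
    have hpos : 0 < pvOnes g := pvOnes_pos g x y hcell
    obtain ⟨m, rfl⟩ : ∃ m, f = m + 1 := ⟨f - 1, by omega⟩
    rw [pvFlood_cons_one row col g x y rest path hcell, pvPush_eq, pvDfsA_succ]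
    have hlt : pvOnes (pvSet2 g x y 0) < pvOnes g := pvOnes_set_zero_lt g x y hcell
    have hinner : ∀ (ds : List (Int × Int)) (st : List (List Int) × List (List Int))
        (rest' : List (Nat × Nat)), pvOnes st.1 < N → pvOnes st.1 ≤ m →
        pvFlood row col st.1 (pvNbrsL row col x y ds ++ rest') st.2 =
          pvFlood row col (ds.foldl (pvStepD row col m x y) st).1 rest'
            (ds.foldl (pvStepD row col m x y) st).2 := by
      intro ds
      induction ds with
      | nil => intro st rest' _ _; simp [pvNbrsL]
      | cons d ds ihd =>
        intro st rest' h1 h2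
        rw [List.foldl_cons]
        by_cases hr : (0 ≤ (x : Int) + d.1 ∧ (x : Int) + d.1 < (row : Int) ∧
            0 ≤ (y : Int) + d.2 ∧ (y : Int) + d.2 < (col : Int))
        · have hns : pvNbrsL row col x y (d :: ds) =
              (((x : Int) + d.1).toNat, ((y : Int) + d.2).toNat) :: pvNbrsL row col x y ds := by
            simp [pvNbrsL, hr]
          by_cases hc : pvCell st.1 ((x : Int) + d.1).toNat ((y : Int) + d.2).toNat = 1
          · have hs : pvStepD row col m x y st d =
                pvDfsA row col m ((x : Int) + d.1).toNat ((y : Int) + d.2).toNat st.1 st.2 := by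
              simp [pvStepD, hr, hc]
            rw [hns, List.cons_append,
              IH (pvOnes st.1) h1 st.1 _ _ (pvNbrsL row col x y ds ++ rest') st.2 m
                le_rfl hc h2, hs]
            have hle := pvDfsA_ones_le row col m ((x : Int) + d.1).toNat
              ((y : Int) + d.2).toNat st.1 st.2
            exact ihd _ rest' (lt_of_le_of_lt hle h1) (le_trans hle h2)
          · have hs : pvStepD row col m x y st d = st := by simp [pvStepD, hr, hc]
            rw [hns, List.cons_append, pvFlood_cons_skip row col st.1 _ _ _ st.2 hc, hs]
            exact ihd st rest' h1 h2
        · have hns : pvNbrsL row col x y (d :: ds) = pvNbrsL row col x y ds := by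
            simp [pvNbrsL, hr]
          have hs : pvStepD row col m x y st d = st := by
            have hng : ¬ (0 ≤ (x : Int) + d.1 ∧ (x : Int) + d.1 < (row : Int) ∧
                0 ≤ (y : Int) + d.2 ∧ (y : Int) + d.2 < (col : Int) ∧
                pvCell st.1 ((x : Int) + d.1).toNat ((y : Int) + d.2).toNat = 1) :=
              fun hh => hr ⟨hh.1, hh.2.1, hh.2.2.1, hh.2.2.2.1⟩
            simp only [pvStepD, if_neg hng]
          rw [hns, hs]
          exact ihd st rest' h1 h2
    exact hinner pvDirs (pvSet2 g x y 0, path ++ [[(x : Int), (y : Int)]]) rest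
      (lt_of_lt_of_le hlt hN) (show pvOnes (pvSet2 g x y 0) ≤ m by omega)

-- one cell of the component loop: starting the flood at a live cell gives exactly
-- what A's dfs gives
theorem pvStep_eq (row col : Nat) (st : List (List Int) × List (List (List Int)))
    (i j : Nat) :
    (if pvCell st.1 i j = 1 then
      ((pvDfsA row col (pvOnes st.1) i j st.1 []).1,
       st.2 ++ [(pvDfsA row col (pvOnes st.1) i j st.1 []).2])
    else st) =
    (if pvCell st.1 i j = 1 then
      ((pvFlood row col st.1 [(i, j)] []).1, st.2 ++ [(pvFlood row col st.1 [(i, j)] []).2])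
    else st) := by
  by_cases h : pvCell st.1 i j = 1
  · rw [if_pos h, if_pos h,
      pvFlood_eq_dfs row col (pvOnes st.1) st.1 i j [] [] (pvOnes st.1) le_rfl h le_rfl,
      pvFlood_nil]
  · rw [if_neg h, if_neg h]

theorem pvFoldl_funext {α β : Type} (f g : β → α → β) (l : List α) (b : β)
    (h : ∀ x a, f x a = g x a) : l.foldl f b = l.foldl g b := by
  induction l generalizing b with
  | nil => rfl
  | cons a l ih => rw [List.foldl_cons, List.foldl_cons, h]; exact ih _

theorem pvLoops_eq (row col : Nat) (b : List (List Int)) :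
    (List.range row).foldl (fun st i =>
      (List.range col).foldl (fun st j =>
        if pvCell st.1 i j = 1 then
          ((pvDfsA row col (pvOnes st.1) i j st.1 []).1,
           st.2 ++ [(pvDfsA row col (pvOnes st.1) i j st.1 []).2])
        else st) st)
      ((b, []) : List (List Int) × List (List (List Int))) =
    (List.range row).foldl (fun st i =>
      (List.range col).foldl (fun st j =>
        if pvCell st.1 i j = 1 then
          ((pvFlood row col st.1 [(i, j)] []).1,
           st.2 ++ [(pvFlood row col st.1 [(i, j)] []).2])
        else st) st)
      ((b, []) : List (List Int) × List (List (List Int))) :=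
  pvFoldl_funext _ _ _ _ (fun st i =>
    pvFoldl_funext _ _ _ _ (fun st' j => pvStep_eq row col st' i j))

-- ===== VERDICT (by name: the statement is the Claim_ definition above) =====
theorem FindColorPatch_spec : Claim_equal_FindColorPatch := by
  unfold Claim_equal_FindColorPatch
  intro rgb thre _ _
  simp only [Spec_FindColorPatch, FindColorPatch, FindColorPatch_alt]
  rw [pvLoops_eq]
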